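-- pv_equiv track=rewrite | github.com/robynskyrme/games-etc | KillerSuDoku_FillCageWithNonRepeatingDigits.py | AdjustOneHigher
-- ===== SOURCE A (Python) =====
-- def AdjustOneHigher(list):
--     total = list[0]
--     list[0] = 999
--
--     cell = 1
--
--     while cell < len(list):
--         if list[cell] < 9:
--             if list.count(list[cell]+1) == 0:
--                 list[cell] +=1
--         cell += 1
--
--     list[0] = total
--     return list
-- ===== SOURCE B (Python) =====
-- def AdjustOneHigher(list):
--     # Different algorithm: instead of rescanning the list for v+1 at each cell,
--     # note that v+1 is present in the current list iff it occurs in the (still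
--     # original) suffix after the cell, or among the already-finalised prefix
--     # values.  So: precompute the last occurrence index of each tail value, and
--     # sweep once with a growing set of finalised prefix values.
--     # Like A, mutates the argument list in place and returns it.
--     tail = list[1:]
--     last = {}
--     for i, w in enumerate(tail, 1):
--         last[w] = i
--     seen = set()
--     for i, v in enumerate(tail, 1):
--         if v < 9 and last.get(v + 1, -1) <= i and (v + 1) not in seen:
--             v += 1
--             list[i] = v
--         seen.add(v)
--     return list
-- ===== Notes on version B (the rewrite author's own statement) =====
-- stated objective: faster
-- what changed: Instead of rescanning the current list for v+1 at every cell, B precomputes the last-occurrence index of each tail value once and sweeps with a growing set of finalised prefix values, deciding each cell by 'v+1 occurs neither after this index nor among finalised prefix values'.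
import Mathlib
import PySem

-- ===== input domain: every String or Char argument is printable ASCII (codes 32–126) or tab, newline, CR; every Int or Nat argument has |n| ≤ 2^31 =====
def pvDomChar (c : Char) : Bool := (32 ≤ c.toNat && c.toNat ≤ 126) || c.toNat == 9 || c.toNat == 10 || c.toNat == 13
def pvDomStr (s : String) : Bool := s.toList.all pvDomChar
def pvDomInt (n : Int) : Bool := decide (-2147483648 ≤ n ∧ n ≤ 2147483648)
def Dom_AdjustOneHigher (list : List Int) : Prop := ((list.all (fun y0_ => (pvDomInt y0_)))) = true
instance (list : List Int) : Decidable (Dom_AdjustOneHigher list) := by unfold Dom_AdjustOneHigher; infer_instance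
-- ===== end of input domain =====

-- B decides each cell from a precomputed last-occurrence index of the tail values plus a
-- growing set of finalised prefix values, instead of A's per-cell rescan of the current
-- list; both Pythons mutate the argument list in place, the equivalence proved is about
-- the returned value.

-- ===== PORT A =====
-- Python while loop over cell = 1 .. len-1; cell is always in range, so l.getD cell 0
-- is exactly Python's l[cell], and l.set is exactly l[cell] = …
def aLoop (l : List Int) (cell : Nat) : List Int :=
  if h : cell < l.length then
    let v := l.getD cell 0
    if v < 9 then
      if l.count (v + 1) = 0 then aLoop (l.set cell (v + 1)) (cell + 1)
      else aLoop l (cell + 1)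
    else aLoop l (cell + 1)
  else l
termination_by l.length - cell
decreasing_by all_goals ((try simp only [List.length_set]); omega)

def AdjustOneHigher (list : List Int) : List Int :=
  match list with
  | [] => []   -- Python raises IndexError here; excluded by Pre_
  | total :: rest => (aLoop (999 :: rest) 1).set 0 total

-- ===== PORT B =====
-- for i, w in enumerate(tail, 1): last[w] = i
def bBuildLast (tail : List Int) : PySem.Dict Int Int :=
  (PySem.List.enumerate tail 1).foldl (fun d p => d.insert p.2 p.1) PySem.Dict.empty

-- for i, v in enumerate(tail, 1): … — structural recursion over that enumerated tail;
-- list[i] = … is PySem.List.pySetD (i always in range), seen is a PySem.Set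
def bLoop (last : PySem.Dict Int Int) (seen : PySem.Set Int) (l : List Int) :
    List (Int × Int) → List Int
  | [] => l
  | (i, v) :: rest =>
    if v < 9 ∧ last.getD (v + 1) (-1) ≤ i ∧ ¬ (v + 1) ∈ seen then
      bLoop last (seen.add (v + 1)) (PySem.List.pySetD l i (v + 1)) rest
    else bLoop last (seen.add v) l rest

def AdjustOneHigher_alt (list : List Int) : List Int :=
  let tail := PySem.List.slice list (some 1) none   -- list[1:]
  bLoop (bBuildLast tail) PySem.Set.empty list (PySem.List.enumerate tail 1)

-- ===== PRECONDITION & SPEC =====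
-- Pre_ excludes only the empty list, on which Python A raises IndexError (list[0]).
def Pre_AdjustOneHigher (list : List Int) : Prop := list ≠ []
instance (list : List Int) : Decidable (Pre_AdjustOneHigher list) := by unfold Pre_AdjustOneHigher; infer_instance
def pvWitness_AdjustOneHigher : List Int := ([3, 2, 2, 8])

def Spec_AdjustOneHigher (list : List Int) (out : List Int) : Prop := out = AdjustOneHigher_alt list
instance (list : List Int) (out : List Int) : Decidable (Spec_AdjustOneHigher list out) := by unfold Spec_AdjustOneHigher; infer_instance

-- ===== CLAIM (what is proved, stated in full; the proofs are below) =====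
def Claim_equal_AdjustOneHigher : Prop := ∀ (list : List Int), Dom_AdjustOneHigher list → Pre_AdjustOneHigher list → Spec_AdjustOneHigher list (AdjustOneHigher list)

-- ===== LEMMAS AND PROOFS =====

-- the last-occurrence dict looked up at default -1 is ≤ c+1 iff the value does not occur
-- in the tail strictly after tail position c (i.e. after list index c+1)
lemma last_le_iff (t : List Int) (k : Int) (c : Nat) :
    ((bBuildLast t).getD k (-1) ≤ (c : Int) + 1) ↔ k ∉ t.drop (c + 1) := by
  induction t using List.reverseRecOn with
  | nil =>
    simp [bBuildLast, PySem.List.enumerate_nil, PySem.Dict.empty, PySem.Dict.getD,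
      PySem.Dict.get?]
    omega
  | append_singleton t x ih =>
    have hb : bBuildLast (t ++ [x]) = (bBuildLast t).insert x (1 + t.length) := by
      simp [bBuildLast, PySem.List.enumerate_append, PySem.List.enumerate_cons,
        PySem.List.enumerate_nil, List.foldl_append]
    rw [hb, PySem.Dict.getD_insert]
    by_cases hc : t.length ≤ c
    · have hd : (t ++ [x]).drop (c + 1) = [] := by
        apply List.drop_eq_nil_of_le; simp; omega
      have hd2 : t.drop (c + 1) = [] := List.drop_eq_nil_of_le (by omega)
      rw [hd]
      by_cases hk : k = x
      · rw [if_pos hk]; simp; omega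
      · rw [if_neg hk]; rw [hd2] at ih; simp at ih ⊢; omega
    · have hsplit : (t ++ [x]).drop (c + 1) = t.drop (c + 1) ++ [x] := by
        rw [List.drop_append_of_le_length (by omega)]
      rw [hsplit]
      by_cases hk : k = x
      · rw [if_pos hk]; subst hk; simp; omega
      · rw [if_neg hk]; rw [ih]; simp [hk]

-- main loop invariant: p is the already-finalised prefix of the tail, s the untouched
-- suffix (still equal to the original tail t0 there), seen holds exactly p's values;
-- then A's counting loop and B's last/seen loop produce the same list
lemma loop_eq (s : List Int) : ∀ (p : List Int) (hd : Int) (seen : PySem.Set Int)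
    (t0 : List Int),
    t0.drop p.length = s →
    (∀ k, k ∈ seen ↔ k ∈ p) →
    (aLoop (999 :: (p ++ s)) (p.length + 1)).set 0 hd
      = bLoop (bBuildLast t0) seen (hd :: (p ++ s))
          (PySem.List.enumerate s ((p.length : Int) + 1)) := by
  induction s with
  | nil =>
    intro p hd seen t0 _ _
    rw [aLoop]
    have hlt : ¬ p.length + 1 < (999 :: (p ++ [])).length := by simp
    rw [dif_neg hlt]
    simp [bLoop, PySem.List.enumerate_nil]
  | cons v s' ih =>
    intro p hd seen t0 ht0 hseen
    have hlen : (999 :: (p ++ v :: s')).length = p.length + s'.length + 2 := by simp; omega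
    have hget : (999 :: (p ++ v :: s')).getD (p.length + 1) 0 = v := by
      rw [List.getD_cons_succ]
      simp [List.getD_eq_getElem?_getD]
    have hts' : t0.drop (p.length + 1) = s' := by
      have h1 := congrArg (List.drop 1) ht0
      simpa [List.drop_drop, Nat.add_comm] using h1
    -- A's absence test on the current list agrees with B's last/seen test
    have hcond : (v < 9 ∧ (999 :: (p ++ v :: s')).count (v + 1) = 0)
        ↔ (v < 9 ∧ (bBuildLast t0).getD (v + 1) (-1) ≤ (p.length : Int) + 1 ∧ ¬ (v + 1) ∈ seen) := by
      constructor
      · rintro ⟨h9, hcnt⟩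
        refine ⟨h9, ?_, ?_⟩
        · rw [last_le_iff, hts']
          intro hmem
          rw [List.count_eq_zero] at hcnt
          exact hcnt (by simp [hmem])
        · intro hmem
          rw [hseen] at hmem
          rw [List.count_eq_zero] at hcnt
          exact hcnt (by simp [hmem])
      · rintro ⟨h9, hlast, hseen'⟩
        refine ⟨h9, ?_⟩
        rw [List.count_eq_zero]
        rw [last_le_iff, hts'] at hlast
        rw [hseen] at hseen'
        simp only [List.mem_cons, List.mem_append]
        rintro (h999 | hp | hv | hs')
        · omega
        · exact hseen' hp
        · omega
        · exact hlast hs'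
    rw [aLoop]
    have hlt : p.length + 1 < (999 :: (p ++ v :: s')).length := by rw [hlen]; omega
    rw [dif_pos hlt]
    simp only [hget, PySem.List.enumerate_cons, bLoop]
    by_cases h9 : v < 9
    · rw [if_pos h9]
      by_cases hcnt : (999 :: (p ++ v :: s')).count (v + 1) = 0
      · have hb : v < 9 ∧ (bBuildLast t0).getD (v + 1) (-1) ≤ (p.length : Int) + 1 ∧ ¬ (v + 1) ∈ seen :=
          hcond.mp ⟨h9, hcnt⟩
        rw [if_pos hcnt, if_pos hb]
        have hsetA : (999 :: (p ++ v :: s')).set (p.length + 1) (v + 1)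
            = 999 :: (p ++ (v + 1) :: s') := by
          rw [List.set_cons_succ]
          congr 1
          rw [List.set_append]
          simp
        have hsetB : PySem.List.pySetD (hd :: (p ++ v :: s')) ((p.length : Int) + 1) (v + 1)
            = hd :: (p ++ (v + 1) :: s') := by
          have hcast : ((p.length : Int) + 1) = ((p.length + 1 : Nat) : Int) := by push_cast; ring
          rw [hcast, PySem.List.pySetD_natCast, List.set_cons_succ]
          congr 1
          rw [List.set_append]
          simp
        rw [hsetA, hsetB]
        have := ih (p ++ [v + 1]) hd (seen.add (v + 1)) t0
          (by simpa using hts')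
          (fun k => by rw [PySem.Set.mem_add]; simp [hseen k, or_comm])
        simpa [List.append_assoc] using this
      · have hb : ¬ (v < 9 ∧ (bBuildLast t0).getD (v + 1) (-1) ≤ (p.length : Int) + 1 ∧ ¬ (v + 1) ∈ seen) := by
          intro h; exact hcnt (hcond.mpr h).2
        rw [if_neg hcnt, if_neg hb]
        have := ih (p ++ [v]) hd (seen.add v) t0
          (by simpa using hts')
          (fun k => by rw [PySem.Set.mem_add]; simp [hseen k, or_comm])
        simpa [List.append_assoc] using this
    · rw [if_neg h9]
      have hb : ¬ (v < 9 ∧ (bBuildLast t0).getD (v + 1) (-1) ≤ (p.length : Int) + 1 ∧ ¬ (v + 1) ∈ seen) := by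
        intro h; exact h9 h.1
      rw [if_neg hb]
      have := ih (p ++ [v]) hd (seen.add v) t0
        (by simpa using hts')
        (fun k => by rw [PySem.Set.mem_add]; simp [hseen k, or_comm])
      simpa [List.append_assoc] using this

-- ===== VERDICT (by name: the statement is the Claim_ definition above) =====
theorem AdjustOneHigher_spec : Claim_equal_AdjustOneHigher := by
  unfold Claim_equal_AdjustOneHigher
  intro list _ hpre
  unfold Spec_AdjustOneHigher AdjustOneHigher AdjustOneHigher_alt
  cases list with
  | nil => exact absurd rfl hpre
  | cons total rest =>
    have hs : PySem.List.slice (total :: rest) (some (1 : Int)) none = rest := by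
      have := PySem.List.slice_from_natCast (xs := total :: rest) (a := 1)
      simpa using this
    rw [hs]
    have := loop_eq rest [] total PySem.Set.empty rest rfl (fun k => by
      simp [PySem.Set.empty])
    simpa using this
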